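-- pv_equiv track=rewrite | github.com/posl/comment_recommendation | script/mod_gen/3_time/ja/135_D/8.py | count
-- ===== SOURCE A (Python) =====
-- def count(s):
--     if len(s) == 1:
--         if s[0] == "?":
--             return 10
--         else:
--             return 1
--     elif len(s) == 0:
--         return 1
--     else:
--         if s[0] == "?":
--             return count(s[1:]) * 10
--         else:
--             return count(s[1:])
-- ===== SOURCE B (Python) =====
-- def count(s):
--     result = 1
--     for c in s:
--         if c == "?":
--             result *= 10
--     return result
-- ===== Notes on version B (the rewrite author's own statement) =====
-- stated objective: simpler
-- what changed: Replaced tail recursion on s[1:] (with separate len-1 and len-0 base cases) by a single iterative accumulator loop that multiplies by 10 per wildcard character.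
import Mathlib
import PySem

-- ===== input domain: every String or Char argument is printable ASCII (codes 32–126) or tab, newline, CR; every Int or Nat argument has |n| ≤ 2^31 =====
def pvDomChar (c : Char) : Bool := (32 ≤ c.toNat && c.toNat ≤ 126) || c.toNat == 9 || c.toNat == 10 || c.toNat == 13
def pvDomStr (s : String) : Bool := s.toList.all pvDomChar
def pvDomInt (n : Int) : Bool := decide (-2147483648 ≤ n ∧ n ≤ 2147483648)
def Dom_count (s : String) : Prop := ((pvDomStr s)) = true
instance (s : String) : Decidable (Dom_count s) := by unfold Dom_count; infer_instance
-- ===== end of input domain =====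

-- B replaces A's tail recursion on s[1:] with a single iterative accumulator loop (simpler).

-- ===== PORT A =====
-- A recurses on s[1:] with base cases len == 1 and len == 0; ported as structural
-- recursion on the character list (s[1:] of a nonempty string is its tail).
def countA : List Char → Int
  | [] => 1
  | [c] => if c = '?' then 10 else 1
  | c :: rest@(_ :: _) => if c = '?' then countA rest * 10 else countA rest

def count (s : String) : Int := countA s.toList

-- ===== PORT B =====
-- B: result = 1; for c in s: if c == '?': result *= 10; return result.
def count_alt (s : String) : Int :=
  s.toList.foldl (fun result c => if c = '?' then result * 10 else result) 1

-- ===== PRECONDITION & SPEC =====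
def Spec_count (s : String) (out : Int) : Prop := out = count_alt s
instance (s : String) (out : Int) : Decidable (Spec_count s out) := by unfold Spec_count; infer_instance

-- ===== CLAIM (what is proved, stated in full; the proofs are below) =====
def Claim_equal_count : Prop := ∀ (s : String), Dom_count s → Spec_count s (count s)

-- ===== LEMMAS AND PROOFS =====

theorem foldl_eq_mul_countA (l : List Char) :
    ∀ r : Int, l.foldl (fun result c => if c = '?' then result * 10 else result) r
      = r * countA l := by
  induction l with
  | nil => intro r; simp [countA]
  | cons c rest ih =>
    intro r
    cases rest with
    | nil =>
      simp only [countA, List.foldl_cons, List.foldl_nil]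
      split <;> ring
    | cons d tl =>
      rw [List.foldl_cons, ih]
      simp only [countA]
      split <;> ring

-- ===== VERDICT (by name: the statement is the Claim_ definition above) =====
theorem count_spec : Claim_equal_count := by
  intro s _
  unfold Spec_count count count_alt
  rw [foldl_eq_mul_countA]
  ring
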